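-- pv_equiv track=rewrite | github.com/wardog21/AoC | 2024/22/main2.py | calcSecret
-- ===== SOURCE A (Python) =====
-- def calcSecret(secret, iterations):
--     for i in range(iterations):
--         secret ^= (secret*64)
--         secret %= 16777216
--         secret ^= (secret//32)
--         secret %= 16777216
--         secret ^= (secret*2048)
--         secret %= 16777216
--     return secret
-- ===== SOURCE B (Python) =====
-- # Matrix-exponentiation reimplementation: the AoC day-22 transform is GF(2)-linear
-- # on 24 bits, so N iterations = one 24x24 GF(2) matrix power applied to the state.
-- M = 0xFFFFFF
--
--
-- def _step(s):
--     s = (s ^ (s << 6)) & M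
--     s ^= s >> 5
--     return (s ^ (s << 11)) & M
--
--
-- def _mat_vec(mat, v):
--     r = 0
--     for col in mat:
--         if v & 1:
--             r ^= col
--         v >>= 1
--     return r
--
--
-- def _mat_mul(a, b):
--     return [_mat_vec(a, col) for col in b]
--
--
-- def calcSecret(secret, iterations):
--     if iterations <= 0:
--         return secret
--     mat = [_step(1 << j) for j in range(24)]
--     res = [1 << j for j in range(24)]  # identity matrix
--     n = iterations
--     while n > 0:
--         if n & 1:
--             res = _mat_mul(mat, res)
--         mat = _mat_mul(mat, mat)
--         n >>= 1
--     return _mat_vec(res, secret % 0x1000000)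
-- ===== Notes on version B (the rewrite author's own statement) =====
-- stated objective: faster
-- what changed: The per-iteration xor/shift transform is GF(2)-linear on 24 bits, so B replaces A's n-step loop by binary exponentiation of the 24x24 GF(2) step matrix (columns stored as 24-bit ints) applied once to the initial state.
import Mathlib
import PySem

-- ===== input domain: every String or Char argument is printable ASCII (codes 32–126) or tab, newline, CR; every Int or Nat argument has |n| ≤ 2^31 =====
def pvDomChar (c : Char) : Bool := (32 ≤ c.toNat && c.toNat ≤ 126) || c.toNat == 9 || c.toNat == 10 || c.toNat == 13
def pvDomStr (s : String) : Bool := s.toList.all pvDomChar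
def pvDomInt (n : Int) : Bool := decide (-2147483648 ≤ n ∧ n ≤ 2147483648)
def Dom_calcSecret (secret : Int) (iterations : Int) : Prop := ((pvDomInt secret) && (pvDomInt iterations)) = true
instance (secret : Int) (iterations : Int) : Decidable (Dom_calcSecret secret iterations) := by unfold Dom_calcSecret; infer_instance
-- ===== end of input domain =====

-- B replaces A's per-iteration loop by binary exponentiation of the 24x24 GF(2) matrix of
-- the (GF(2)-linear) step transform, applied once to the initial 24-bit state.

-- ===== PORT A =====
def calcSecret (secret : Int) (iterations : Int) : Int :=
  (PySem.List.pyRange 0 iterations 1).foldl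
    (fun s _ =>
      let s := PySem.Int.mod (PySem.Int.bxor s (s * 64)) 16777216
      let s := PySem.Int.mod (PySem.Int.bxor s (PySem.Int.floordiv s 32)) 16777216
      let s := PySem.Int.mod (PySem.Int.bxor s (s * 2048)) 16777216
      s)
    secret

-- ===== PORT B =====
-- Source B's values are provably nonnegative Python ints at every point below (results of
-- `% 0x1000000`, and of `^`/`&`/`<<`/`>>` on nonnegatives; the loop counter is guarded by
-- `n > 0`), so the port carries them as Nat, where Lean's ^^^/&&&/<<</>>> are exact for
-- Python's ^ & << >> on nonnegative operands.
def pvStepN (s : Nat) : Nat :=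
  let s := (s ^^^ s <<< 6) &&& 16777215
  let s := s ^^^ s >>> 5
  (s ^^^ s <<< 11) &&& 16777215

def pvMatVec (mat : List Nat) (v : Nat) : Nat :=
  (mat.foldl (fun (rv : Nat × Nat) col =>
    (if rv.2 &&& 1 ≠ 0 then rv.1 ^^^ col else rv.1, rv.2 >>> 1)) (0, v)).1

def pvMatMul (a b : List Nat) : List Nat := b.map (fun col => pvMatVec a col)

def pvPowLoop (mat res : List Nat) (n : Nat) : List Nat :=
  if 0 < n then
    pvPowLoop (pvMatMul mat mat) (if n &&& 1 ≠ 0 then pvMatMul mat res else res) (n >>> 1)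
  else res
termination_by n
decreasing_by simp only [Nat.shiftRight_eq_div_pow, pow_one]; omega

def calcSecret_alt (secret : Int) (iterations : Int) : Int :=
  if iterations ≤ 0 then secret
  else
    let mat := (List.range 24).map fun j => pvStepN (1 <<< j)
    let res := (List.range 24).map fun j => (1 : Nat) <<< j
    ((pvMatVec (pvPowLoop mat res iterations.toNat) (PySem.Int.mod secret 16777216).toNat : Nat) : Int)

-- ===== PRECONDITION & SPEC =====
def Spec_calcSecret (secret : Int) (iterations : Int) (out : Int) : Prop := out = calcSecret_alt secret iterations
instance (secret : Int) (iterations : Int) (out : Int) : Decidable (Spec_calcSecret secret iterations out) := by unfold Spec_calcSecret; infer_instance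

-- ===== CLAIM (what is proved, stated in full; the proofs are below) =====
def Claim_equal_calcSecret : Prop := ∀ (secret : Int) (iterations : Int), Dom_calcSecret secret iterations → Spec_calcSecret secret iterations (calcSecret secret iterations)

-- ===== LEMMAS AND PROOFS =====

-- A's loop body as a standalone function (proof helper only).
def pvBody (s : Int) : Int :=
  let s := PySem.Int.mod (PySem.Int.bxor s (s * 64)) 16777216
  let s := PySem.Int.mod (PySem.Int.bxor s (PySem.Int.floordiv s 32)) 16777216
  let s := PySem.Int.mod (PySem.Int.bxor s (s * 2048)) 16777216
  s

lemma pvFoldConst {α β : Type} (f : α → α) : ∀ (l : List β) (x : α),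
    l.foldl (fun s _ => f s) x = f^[l.length] x := by
  intro l
  induction l with
  | nil => intro x; rfl
  | cons a l ih =>
      intro x
      simp only [List.foldl, List.length_cons]
      rw [ih, Function.iterate_succ_apply]

lemma pvN1 (x : Nat) : x &&& 16777215 = x % 16777216 := by
  have h : (16777215 : Nat) = 2 ^ 24 - 1 := by norm_num
  have h2 : (16777216 : Nat) = 2 ^ 24 := by norm_num
  rw [h, h2, Nat.and_two_pow_sub_one_eq_mod]

lemma pvXorMod (x y : Nat) : (x ^^^ y) % 16777216 = x % 16777216 ^^^ y % 16777216 := by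
  have h2 : (16777216 : Nat) = 2 ^ 24 := by norm_num
  rw [h2, Nat.xor_mod_two_pow]

lemma pvN2 : ∀ (k : Nat) (a : Nat), a < 2 ^ k → (2 ^ k - 1) ^^^ a = 2 ^ k - 1 - a := by
  intro k
  induction k with
  | zero => intro a ha; interval_cases a; rfl
  | succ k ih =>
      intro a ha
      have h2 : 2 ^ (k + 1) = 2 * 2 ^ k := by rw [pow_succ]; ring
      have hp : 0 < 2 ^ k := Nat.pow_pos (by norm_num)
      have hz : (2 ^ (k + 1) - 1) ^^^ a
          = 2 * (((2 ^ (k + 1) - 1) / 2) ^^^ (a / 2)) + ((2 ^ (k + 1) - 1) + a) % 2 := by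
        rw [← Nat.xor_div_two, ← Nat.xor_mod_two_eq]; omega
      have hd : (2 ^ (k + 1) - 1) / 2 = 2 ^ k - 1 := by omega
      rw [hz, hd, ih (a / 2) (by omega)]
      omega

lemma pvXorLt (x y : Nat) (hx : x < 16777216) (hy : y < 16777216) : x ^^^ y < 16777216 := by
  have h2 : (16777216 : Nat) = 2 ^ 24 := by norm_num
  rw [h2] at *
  exact Nat.xor_lt_two_pow hx hy

-- Python's ^ commutes with taking the low 24 bits (two's complement), stated for % 2^24.
lemma pvEM (x y : Int) : (PySem.Int.bxor x y) % 16777216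
    = ((((x % 16777216).toNat) ^^^ ((y % 16777216).toNat) : Nat) : Int) := by
  have hmask : (16777215 : Nat) = 2 ^ 24 - 1 := by norm_num
  have hM : (16777216 : Nat) = 2 ^ 24 := by norm_num
  have hcast : ∀ n : Nat, ((n : Int)) % 16777216 = ((n % 16777216 : Nat) : Int) := by
    intro n; omega
  have hneg : ∀ n : Nat, (-(n : Int) - 1) % 16777216 = ((16777215 - n % 16777216 : Nat) : Int) := by
    intro n; omega
  unfold PySem.Int.bxor
  split_ifs with hx hy hy
  · have h1 : (x % 16777216).toNat = x.toNat % 16777216 := by omega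
    have h2 : (y % 16777216).toNat = y.toNat % 16777216 := by omega
    rw [h1, h2, hcast, pvXorMod]
  · have h1 : (x % 16777216).toNat = x.toNat % 16777216 := by omega
    have h2 : (y % 16777216).toNat = 16777215 - ((-y - 1).toNat % 16777216) := by omega
    rw [h1, h2, hneg, pvXorMod]
    congr 1
    set a := x.toNat % 16777216 with hadef
    set b := (-y - 1).toNat % 16777216 with hbdef
    have ha : a < 2 ^ 24 := by rw [hadef, ← hM]; omega
    have hb : b < 2 ^ 24 := by rw [hbdef, ← hM]; omega
    rw [hmask, ← pvN2 24 b hb, ← Nat.xor_assoc, Nat.xor_comm a (2 ^ 24 - 1), Nat.xor_assoc,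
      pvN2 24 (a ^^^ b) (Nat.xor_lt_two_pow ha hb)]
  · have h1 : (x % 16777216).toNat = 16777215 - ((-x - 1).toNat % 16777216) := by omega
    have h2 : (y % 16777216).toNat = y.toNat % 16777216 := by omega
    rw [h1, h2, hneg, pvXorMod]
    congr 1
    set a := (-x - 1).toNat % 16777216 with hadef
    set b := y.toNat % 16777216 with hbdef
    have ha : a < 2 ^ 24 := by rw [hadef, ← hM]; omega
    have hb : b < 2 ^ 24 := by rw [hbdef, ← hM]; omega
    rw [hmask, ← pvN2 24 a ha, Nat.xor_assoc,
      pvN2 24 (a ^^^ b) (Nat.xor_lt_two_pow ha hb)]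
  · have h1 : (x % 16777216).toNat = 16777215 - ((-x - 1).toNat % 16777216) := by omega
    have h2 : (y % 16777216).toNat = 16777215 - ((-y - 1).toNat % 16777216) := by omega
    rw [h1, h2, hcast, pvXorMod]
    congr 1
    set a := (-x - 1).toNat % 16777216 with hadef
    set b := (-y - 1).toNat % 16777216 with hbdef
    have ha : a < 2 ^ 24 := by rw [hadef, ← hM]; omega
    have hb : b < 2 ^ 24 := by rw [hbdef, ← hM]; omega
    rw [hmask, ← pvN2 24 a ha, ← pvN2 24 b hb, ← Nat.xor_assoc,
      Nat.xor_comm ((2 ^ 24 - 1) ^^^ a) (2 ^ 24 - 1), ← Nat.xor_assoc,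
      Nat.xor_self, Nat.zero_xor]

lemma pvStepN_lt (s : Nat) : pvStepN s < 16777216 := by
  unfold pvStepN
  simp only [pvN1]
  omega

lemma pvXsh (i x y : Nat) : (x ^^^ y) ^^^ (x ^^^ y) <<< i = (x ^^^ x <<< i) ^^^ (y ^^^ y <<< i) := by
  rw [Nat.shiftLeft_xor_distrib]
  simp [Nat.xor_comm, Nat.xor_left_comm]

lemma pvXshr (i x y : Nat) : (x ^^^ y) ^^^ (x ^^^ y) >>> i = (x ^^^ x >>> i) ^^^ (y ^^^ y >>> i) := by
  rw [Nat.shiftRight_xor_distrib]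
  simp [Nat.xor_comm, Nat.xor_left_comm]

-- The step transform is GF(2)-linear.
lemma pvStepN_linear (x y : Nat) : pvStepN (x ^^^ y) = pvStepN x ^^^ pvStepN y := by
  have h1 : ∀ z w : Nat, ((z ^^^ w) ^^^ (z ^^^ w) <<< 6) &&& 16777215
      = ((z ^^^ z <<< 6) &&& 16777215) ^^^ ((w ^^^ w <<< 6) &&& 16777215) := by
    intro z w; rw [pvXsh, Nat.and_xor_distrib_right]
  have h3 : ∀ z w : Nat, ((z ^^^ w) ^^^ (z ^^^ w) <<< 11) &&& 16777215
      = ((z ^^^ z <<< 11) &&& 16777215) ^^^ ((w ^^^ w <<< 11) &&& 16777215) := by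
    intro z w; rw [pvXsh, Nat.and_xor_distrib_right]
  simp only [pvStepN]
  rw [h1, pvXshr 5, h3]

lemma pvStepN_zero : pvStepN 0 = 0 := by decide

lemma pvMV_acc : ∀ (mat : List Nat) (r v : Nat),
    (mat.foldl (fun (rv : Nat × Nat) col =>
      (if rv.2 &&& 1 ≠ 0 then rv.1 ^^^ col else rv.1, rv.2 >>> 1)) (r, v)).1
    = r ^^^ (mat.foldl (fun (rv : Nat × Nat) col =>
      (if rv.2 &&& 1 ≠ 0 then rv.1 ^^^ col else rv.1, rv.2 >>> 1)) (0, v)).1 := by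
  intro mat
  induction mat with
  | nil => intro r v; simp
  | cons c rest ih =>
      intro r v
      simp only [List.foldl]
      rw [ih, ih (if v &&& 1 ≠ 0 then (0 : Nat) ^^^ c else 0) (v >>> 1)]
      by_cases h : v &&& 1 ≠ 0
      · rw [if_pos h, if_pos h, Nat.zero_xor, Nat.xor_assoc]
      · rw [if_neg h, if_neg h, Nat.zero_xor]

lemma pvMV_cons (c : Nat) (mat : List Nat) (v : Nat) :
    pvMatVec (c :: mat) v = (if v &&& 1 ≠ 0 then c else 0) ^^^ pvMatVec mat (v >>> 1) := by
  unfold pvMatVec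
  simp only [List.foldl]
  rw [pvMV_acc]
  by_cases h : v &&& 1 ≠ 0
  · rw [if_pos h, if_pos h, Nat.zero_xor]
  · rw [if_neg h, if_neg h, Nat.zero_xor]

lemma pvMV_zero (mat : List Nat) : pvMatVec mat 0 = 0 := by
  induction mat with
  | nil => rfl
  | cons c rest ih => rw [pvMV_cons]; simp [ih]

lemma pvXorCancel (c A B : Nat) : (c ^^^ A) ^^^ (c ^^^ B) = A ^^^ B := by
  rw [Nat.xor_comm c A, Nat.xor_assoc, Nat.xor_xor_cancel_left]

lemma pvMV_linear (mat : List Nat) : ∀ (x y : Nat),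
    pvMatVec mat (x ^^^ y) = pvMatVec mat x ^^^ pvMatVec mat y := by
  induction mat with
  | nil => intro x y; simp [pvMatVec]
  | cons c rest ih =>
      intro x y
      rw [pvMV_cons, pvMV_cons, pvMV_cons, Nat.shiftRight_xor_distrib, ih]
      have hb : ∀ z : Nat, (z &&& 1 ≠ 0) ↔ z % 2 = 1 := by
        intro z; rw [Nat.and_one_is_mod]; omega
      simp only [hb, Nat.xor_mod_two_eq]
      rcases Nat.mod_two_eq_zero_or_one x with hx | hx <;>
        rcases Nat.mod_two_eq_zero_or_one y with hy | hy
      · have hxy : (x + y) % 2 = 0 := by omega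
        simp [hx, hy, hxy]
      · have hxy : (x + y) % 2 = 1 := by omega
        simp only [hx, hy, hxy]
        simp [Nat.xor_left_comm]
      · have hxy : (x + y) % 2 = 1 := by omega
        simp only [hx, hy, hxy]
        simp [Nat.xor_assoc]
      · have hxy : (x + y) % 2 = 0 := by omega
        simp only [hx, hy, hxy]
        simp only [if_neg (by omega : ¬(0 : Nat) = 1)]
        rw [Nat.zero_xor, pvXorCancel]

lemma pvMV_basis : ∀ (k : Nat) (f : Nat → Nat),
    (∀ x y, f (x ^^^ y) = f x ^^^ f y) → f 0 = 0 → ∀ v, v < 2 ^ k →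
    pvMatVec ((List.range k).map fun j => f (1 <<< j)) v = f v := by
  intro k
  induction k with
  | zero =>
      intro f hf h0 v hv
      have hv0 : v = 0 := by simpa using Nat.lt_one_iff.mp (by simpa using hv)
      subst hv0
      simpa [pvMatVec] using h0.symm
  | succ k ih =>
      intro f hf h0 v hv
      have h2z : ∀ z : Nat, z <<< 1 = 2 * z := by
        intro z; rw [Nat.shiftLeft_eq]; ring
      have hg : ∀ x y : Nat, f (2 * (x ^^^ y)) = f (2 * x) ^^^ f (2 * y) := by
        intro x y
        have : 2 * (x ^^^ y) = 2 * x ^^^ 2 * y := by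
          rw [← h2z, ← h2z, ← h2z, Nat.shiftLeft_xor_distrib]
        rw [this, hf]
      have hcomp : (List.range (k + 1)).map (fun j => f (1 <<< j))
          = f 1 :: (List.range k).map (fun j => (fun z => f (2 * z)) (1 <<< j)) := by
        rw [List.range_succ_eq_map, List.map_cons, List.map_map]
        congr 1
        apply List.map_congr_left
        intro j _
        simp only [Function.comp]
        congr 1
        rw [Nat.shiftLeft_eq, Nat.shiftLeft_eq, Nat.succ_eq_add_one, pow_succ]
        ring
      rw [hcomp, pvMV_cons]
      have hvd : v >>> 1 = v / 2 := by rw [Nat.shiftRight_eq_div_pow, pow_one]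
      have hvk : v >>> 1 < 2 ^ k := by
        rw [hvd]
        have h2 : 2 ^ (k + 1) = 2 * 2 ^ k := by rw [pow_succ]; ring
        omega
      rw [ih (fun z => f (2 * z)) hg (by simpa using h0) (v >>> 1) hvk, hvd]
      rw [Nat.and_one_is_mod]
      rcases Nat.mod_two_eq_zero_or_one v with h1 | h1
      · have hvv : 2 * (v / 2) = v := by omega
        simp [h1, hvv]
      · have hev : Even (2 * (v / 2)) := even_two_mul _
        have hxor : (2 * (v / 2)) ^^^ 1 = 2 * (v / 2) + 1 := Nat.xor_one_of_even hev
        have hvv : 1 ^^^ 2 * (v / 2) = v := by rw [Nat.xor_comm, hxor]; omega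
        simp only [h1, if_pos (by omega : (1:Nat) ≠ 0)]
        rw [← hf, hvv]

lemma pvMV_mul (a : List Nat) : ∀ (b : List Nat) (v : Nat),
    pvMatVec (pvMatMul a b) v = pvMatVec a (pvMatVec b v) := by
  intro b
  induction b with
  | nil =>
      intro v
      have h1 : pvMatVec ([] : List Nat) v = 0 := by simp [pvMatVec]
      show pvMatVec (pvMatMul a []) v = pvMatVec a (pvMatVec [] v)
      have h2 : pvMatMul a [] = [] := rfl
      rw [h2, h1, pvMV_zero]
  | cons c rest ih =>
      intro v
      show pvMatVec (pvMatVec a c :: pvMatMul a rest) v = _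
      rw [pvMV_cons, pvMV_cons, ih, pvMV_linear]
      congr 1
      by_cases h : v &&& 1 ≠ 0
      · rw [if_pos h, if_pos h]
      · rw [if_neg h, if_neg h, pvMV_zero]

lemma pvPow_sem : ∀ (n : Nat) (mat res : List Nat) (v : Nat),
    pvMatVec (pvPowLoop mat res n) v
      = (fun w => pvMatVec mat w)^[n] (pvMatVec res v) := by
  intro n
  induction n using Nat.strong_induction_on with
  | _ n ih =>
      intro mat res v
      by_cases hn : 0 < n
      · rw [pvPowLoop, if_pos hn]
        have hlt : n >>> 1 < n := by
          simp only [Nat.shiftRight_eq_div_pow, pow_one]; omega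
        rw [ih _ hlt]
        have hFF : (fun w => pvMatVec (pvMatMul mat mat) w)
            = (fun w => pvMatVec mat w)^[2] := by
          funext w
          simp [pvMV_mul, Function.iterate_succ_apply]
        rw [hFF, ← Function.iterate_mul]
        have hd : n >>> 1 = n / 2 := by rw [Nat.shiftRight_eq_div_pow, pow_one]
        by_cases hodd : n &&& 1 ≠ 0
        · have h1 : n % 2 = 1 := by rw [Nat.and_one_is_mod] at hodd; omega
          rw [if_pos hodd, pvMV_mul]
          have : pvMatVec mat (pvMatVec res v)
              = (fun w => pvMatVec mat w)^[1] (pvMatVec res v) := by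
            simp
          rw [this, ← Function.iterate_add_apply]
          congr 1
          omega
        · have h1 : n % 2 = 0 := by rw [Nat.and_one_is_mod] at hodd; omega
          rw [if_neg hodd]
          congr 1
          omega
      · rw [pvPowLoop, if_neg hn]
        have h0 : n = 0 := by omega
        simp [h0]

lemma pvStepN_spec (t u1 u2 : Nat) (ht : t < 16777216)
    (h1 : u1 = t ^^^ (t * 64) % 16777216) (h2 : u2 = u1 ^^^ u1 / 32) :
    pvStepN t = u2 ^^^ (u2 * 2048) % 16777216 := by
  have hu1 : u1 < 16777216 := by
    rw [h1]; exact pvXorLt _ _ ht (Nat.mod_lt _ (by norm_num))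
  have hu2 : u2 < 16777216 := by
    rw [h2]
    exact pvXorLt _ _ hu1 (lt_of_le_of_lt (Nat.div_le_self _ _) hu1)
  have p6 : t <<< 6 = t * 64 := by rw [Nat.shiftLeft_eq]
  have e1 : (t ^^^ t <<< 6) &&& 16777215 = u1 := by
    rw [p6, pvN1, pvXorMod, Nat.mod_eq_of_lt ht, h1]
  have p5 : u1 >>> 5 = u1 / 32 := by rw [Nat.shiftRight_eq_div_pow]
  have e2 : u1 ^^^ u1 >>> 5 = u2 := by rw [p5, h2]
  have p11 : u2 <<< 11 = u2 * 2048 := by rw [Nat.shiftLeft_eq]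
  have e3 : (u2 ^^^ u2 <<< 11) &&& 16777215 = u2 ^^^ (u2 * 2048) % 16777216 := by
    rw [p11, pvN1, pvXorMod, Nat.mod_eq_of_lt hu2]
  show (((t ^^^ t <<< 6) &&& 16777215 ^^^ ((t ^^^ t <<< 6) &&& 16777215) >>> 5)
      ^^^ (((t ^^^ t <<< 6) &&& 16777215 ^^^ ((t ^^^ t <<< 6) &&& 16777215) >>> 5)) <<< 11)
      &&& 16777215 = u2 ^^^ (u2 * 2048) % 16777216
  rw [e1, e2, e3]

-- A's loop body equals the 24-bit step applied to the low 24 bits of the state.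
lemma pvBody_eq (s : Int) : pvBody s = ((pvStepN ((s % 16777216).toNat) : Nat) : Int) := by
  have hMpos : (0 : Int) < 16777216 := by norm_num
  set t : Nat := (s % 16777216).toNat with ht
  have htlt : t < 16777216 := by omega
  set u1 : Nat := t ^^^ (t * 64) % 16777216 with hu1def
  have hu1 : u1 < 16777216 := by
    rw [hu1def]; exact pvXorLt _ _ htlt (Nat.mod_lt _ (by norm_num))
  set u2 : Nat := u1 ^^^ u1 / 32 with hu2def
  have hu2 : u2 < 16777216 := by
    rw [hu2def]
    exact pvXorLt _ _ hu1 (lt_of_le_of_lt (Nat.div_le_self _ _) hu1)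
  have s1 : PySem.Int.mod (PySem.Int.bxor s (s * 64)) 16777216 = ((u1 : Nat) : Int) := by
    rw [PySem.Int.mod_eq_emod_of_pos hMpos, pvEM]
    rw [show ((s * 64) % 16777216).toNat = (t * 64) % 16777216 by omega, ← ht, ← hu1def]
  have s2 : PySem.Int.mod (PySem.Int.bxor ((u1 : Nat) : Int)
      (PySem.Int.floordiv ((u1 : Nat) : Int) 32)) 16777216 = ((u2 : Nat) : Int) := by
    rw [PySem.Int.floordiv_eq_ediv_of_pos (by norm_num : (0:Int) < 32)]
    rw [PySem.Int.mod_eq_emod_of_pos hMpos, pvEM]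
    rw [show (((u1 : Nat) : Int) % 16777216).toNat = u1 by omega,
      show ((((u1 : Nat) : Int) / 32) % 16777216).toNat = u1 / 32 by omega, ← hu2def]
  have s3 : PySem.Int.mod (PySem.Int.bxor ((u2 : Nat) : Int) (((u2 : Nat) : Int) * 2048)) 16777216
      = ((u2 ^^^ (u2 * 2048) % 16777216 : Nat) : Int) := by
    rw [PySem.Int.mod_eq_emod_of_pos hMpos, pvEM]
    rw [show (((u2 : Nat) : Int) % 16777216).toNat = u2 by omega,
      show ((((u2 : Nat) : Int) * 2048) % 16777216).toNat = (u2 * 2048) % 16777216 by omega]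
  simp only [pvBody]
  rw [s1, s2, s3, pvStepN_spec t u1 u2 htlt hu1def hu2def]

lemma pvBody_iter : ∀ (k : Nat) (t : Nat), t < 16777216 →
    pvBody^[k] ((t : Nat) : Int) = ((pvStepN^[k] t : Nat) : Int) := by
  intro k
  induction k with
  | zero => intro t ht; rfl
  | succ k ih =>
      intro t ht
      rw [Function.iterate_succ_apply, Function.iterate_succ_apply, pvBody_eq]
      rw [show ((((t : Nat) : Int)) % 16777216).toNat = t by omega]
      exact ih _ (pvStepN_lt t)

lemma pvF_iter (mat : List Nat) (hmat : ∀ w, w < 16777216 → pvMatVec mat w = pvStepN w) :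
    ∀ (k : Nat) (w : Nat), w < 16777216 →
    (fun w => pvMatVec mat w)^[k] w = pvStepN^[k] w := by
  intro k
  induction k with
  | zero => intro w hw; rfl
  | succ k ih =>
      intro w hw
      rw [Function.iterate_succ_apply, Function.iterate_succ_apply]
      simp only [hmat w hw]
      exact ih _ (pvStepN_lt w)

-- ===== VERDICT (by name: the statement is the Claim_ definition above) =====
theorem calcSecret_spec : Claim_equal_calcSecret := by
  intro s n _
  show calcSecret s n = calcSecret_alt s n
  have hA : calcSecret s n = pvBody^[(PySem.List.pyRange 0 n 1).length] s := by
    show (PySem.List.pyRange 0 n 1).foldl (fun s _ => pvBody s) s = _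
    exact pvFoldConst pvBody _ s
  have hlen : (PySem.List.pyRange 0 n 1).length = n.toNat := by
    rw [PySem.List.length_pyRange_one]; simp
  rw [hA, hlen]
  by_cases hn : n ≤ 0
  · have h0 : n.toNat = 0 := by omega
    rw [h0]
    simp only [calcSecret_alt]
    rw [if_pos hn]
    rfl
  · simp only [calcSecret_alt]
    rw [if_neg hn]
    have hMpos : (0 : Int) < 16777216 := by norm_num
    rw [PySem.Int.mod_eq_emod_of_pos hMpos]
    set t : Nat := (s % 16777216).toNat with ht
    have htlt : t < 16777216 := by omega
    have hM24 : (16777216 : Nat) = 2 ^ 24 := by norm_num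
    have hmat : ∀ w : Nat, w < 16777216 →
        pvMatVec ((List.range 24).map fun j => pvStepN (1 <<< j)) w = pvStepN w := by
      intro w hw
      exact pvMV_basis 24 pvStepN pvStepN_linear pvStepN_zero w (by rw [← hM24]; exact hw)
    have hid : pvMatVec ((List.range 24).map fun j => (1 : Nat) <<< j) t = t := by
      have := pvMV_basis 24 (fun z => z) (fun _ _ => rfl) rfl t (by rw [← hM24]; exact htlt)
      simpa using this
    rw [pvPow_sem, hid, pvF_iter _ hmat _ t htlt]
    obtain ⟨m, hm⟩ : ∃ m, n.toNat = m + 1 := ⟨n.toNat - 1, by omega⟩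
    rw [hm, Function.iterate_succ_apply, pvBody_eq, ← ht,
      pvBody_iter m (pvStepN t) (pvStepN_lt t), ← Function.iterate_succ_apply]
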